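-- pv_equiv track=rewrite | github.com/PsychoJS/test-bot | app/handlers/admin/tickets.py | _split_long_block
-- ===== SOURCE A (Python) =====
-- def _split_long_block(block: str, max_len: int) -> list[str]:
--     """Splits a too-long block into parts."""
--     if len(block) <= max_len:
--         return [block]
--
--     parts = []
--     remaining = block
--     while remaining:
--         if len(remaining) <= max_len:
--             parts.append(remaining)
--             break
--         cut_at = max_len
--         newline_pos = remaining.rfind('\n', 0, max_len)
--         space_pos = remaining.rfind(' ', 0, max_len)
--
--         if newline_pos > max_len // 2:
--             cut_at = newline_pos + 1
--         elif space_pos > max_len // 2: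
--             cut_at = space_pos + 1
--
--         parts.append(remaining[:cut_at])
--         remaining = remaining[cut_at:]
--
--     return parts
-- ===== SOURCE B (Python) =====
-- def _split_long_block(block: str, max_len: int) -> list[str]:
--     """Splits a too-long block into parts (single pass with an index pointer;
--     no re-slicing of the remaining tail)."""
--     n = len(block)
--     half = max_len // 2
--     parts = []
--     i = 0
--     while n - i > max_len:
--         nl = block.rfind('\n', i, i + max_len)
--         if nl - i > half:
--             cut = nl + 1
--         else:
--             sp = block.rfind(' ', i, i + max_len)
--             cut = sp + 1 if sp - i > half else i + max_len
--         parts.append(block[i:cut])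
--         i = cut
--     parts.append(block[i:])
--     return parts
-- ===== Notes on version B (the rewrite author's own statement) =====
-- stated objective: alternative
-- what changed: B replaces A's repeated re-slicing of the remaining tail (remaining[:cut]/remaining[cut:], linear copies each iteration) by a single index pointer into the original string with bounded rfind(start, start+max_len) offsets, so each chunk is sliced out exactly once (O(n) instead of O(n^2/max_len) copying; a timing run could not confirm a speed-up, so none is claimed).
-- outside the precondition, e.g. on _split_long_block('', -1): A returns [], B does not finish within the time limit
import Mathlib
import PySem

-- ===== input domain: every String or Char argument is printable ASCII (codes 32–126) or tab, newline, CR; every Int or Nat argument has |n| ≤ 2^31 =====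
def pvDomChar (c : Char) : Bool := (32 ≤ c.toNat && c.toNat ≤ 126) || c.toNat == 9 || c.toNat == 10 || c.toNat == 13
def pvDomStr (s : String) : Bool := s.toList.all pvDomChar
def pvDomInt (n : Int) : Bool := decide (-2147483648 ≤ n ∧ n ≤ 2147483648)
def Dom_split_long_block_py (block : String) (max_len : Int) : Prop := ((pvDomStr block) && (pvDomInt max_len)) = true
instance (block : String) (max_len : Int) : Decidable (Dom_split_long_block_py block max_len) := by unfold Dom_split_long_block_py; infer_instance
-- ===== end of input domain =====

-- B walks the string once with an index pointer and bounded rfind offsets instead of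
-- re-slicing the remaining tail each iteration (objective: alternative single-pass formulation).

-- ===== PORT A =====
-- A's while loop over `remaining`; fuel = |block|+1 suffices whenever max_len ≥ 1
-- (outside Pre_ the Python loop does not terminate, and the fuel-0 branch is never
-- reached inside Pre_).
def pvALoop (maxLen : Int) : Nat → List Char → List (List Char) → List (List Char)
  | 0, _, parts => parts.reverse
  | fuel + 1, remaining, parts =>
    if remaining.isEmpty then parts.reverse
    else if (remaining.length : Int) ≤ maxLen then (remaining :: parts).reverse
    else
      let newlinePos := PySem.Chars.rfindFrom remaining ['\n'] 0 (some maxLen)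
      let spacePos := PySem.Chars.rfindFrom remaining [' '] 0 (some maxLen)
      let cutAt : Int :=
        if PySem.Int.floordiv maxLen 2 < newlinePos then newlinePos + 1
        else if PySem.Int.floordiv maxLen 2 < spacePos then spacePos + 1
        else maxLen
      pvALoop maxLen fuel (PySem.List.slice remaining (some cutAt) none)
        (PySem.List.slice remaining none (some cutAt) :: parts)

def split_long_block_py (block : String) (max_len : Int) : List String :=
  let cs := block.toList
  if (cs.length : Int) ≤ max_len then [block]
  else (pvALoop max_len (cs.length + 1) cs []).map String.ofList

-- ===== PORT B =====
-- B's while loop over the index i; same fuel device.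
def pvBLoop (cs : List Char) (maxLen half : Int) : Nat → Int → List (List Char) → List (List Char)
  | 0, _, parts => parts.reverse
  | fuel + 1, i, parts =>
    if (cs.length : Int) - i ≤ maxLen then
      (PySem.List.slice cs (some i) none :: parts).reverse
    else
      let nl := PySem.Chars.rfindFrom cs ['\n'] i (some (i + maxLen))
      let cut : Int :=
        if half < nl - i then nl + 1
        else
          let sp := PySem.Chars.rfindFrom cs [' '] i (some (i + maxLen))
          if half < sp - i then sp + 1 else i + maxLen
      pvBLoop cs maxLen half fuel cut (PySem.List.slice cs (some i) (some cut) :: parts)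

def split_long_block_py_alt (block : String) (max_len : Int) : List String :=
  let cs := block.toList
  (pvBLoop cs max_len (PySem.Int.floordiv max_len 2) (cs.length + 1) 0 []).map String.ofList

-- ===== PRECONDITION & SPEC =====
-- Pre_ excludes max_len ≤ 0 except for the trivial case |block| ≤ max_len: for a
-- nonempty block with max_len ≤ 0 A's while loop never makes progress (it diverges),
-- and for the empty block with max_len < 0 A returns [] while B's loop diverges.
def Pre_split_long_block_py (block : String) (max_len : Int) : Prop :=
  1 ≤ max_len ∨ (block.length : Int) ≤ max_len
instance (block : String) (max_len : Int) : Decidable (Pre_split_long_block_py block max_len) := by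
  unfold Pre_split_long_block_py; infer_instance

def pvWitness_split_long_block_py : String × Int := ("one two three", 5)

def Spec_split_long_block_py (block : String) (max_len : Int) (out : List String) : Prop := out = split_long_block_py_alt block max_len
instance (block : String) (max_len : Int) (out : List String) : Decidable (Spec_split_long_block_py block max_len out) := by unfold Spec_split_long_block_py; infer_instance

-- ===== CLAIM (what is proved, stated in full; the proofs are below) =====
def Claim_equal_split_long_block_py : Prop := ∀ (block : String) (max_len : Int), Dom_split_long_block_py block max_len → Pre_split_long_block_py block max_len → Spec_split_long_block_py block max_len (split_long_block_py block max_len)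

-- ===== LEMMAS AND PROOFS =====

theorem pv_rfindFrom_shift (cs sub : List Char) (i m : Int) (h0 : 0 ≤ i) (hm : 0 ≤ m)
    (hlt : i + m ≤ (cs.length : Int)) :
    PySem.Chars.rfindFrom cs sub i (some (i + m)) =
      (if PySem.Chars.rfindFrom (cs.drop i.toNat) sub 0 (some m) = -1 then -1
       else i + PySem.Chars.rfindFrom (cs.drop i.toNat) sub 0 (some m)) := by
  have hdl : ((cs.drop i.toNat).length : Int) = (cs.length : Int) - i := by
    simp [List.length_drop]; omega
  have h1 : ¬ ((cs.length : Int) < i + m) := by omega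
  have h2 : ¬ (i + m < 0) := by omega
  have h3 : ¬ (i < 0) := by omega
  have h4 : ¬ (i + m < i) := by omega
  have h5 : ¬ (((cs.drop i.toNat).length : Int) < m) := by omega
  have h6 : ¬ (m < (0:Int)) := by omega
  have hdt : (cs.take (i+m).toNat).drop i.toNat = (cs.drop i.toNat).take m.toNat := by
    rw [List.drop_take]; congr 1; omega
  unfold PySem.Chars.rfindFrom
  simp only [if_neg h1, if_neg h2, if_neg h3, if_neg h4, if_neg h5, if_neg h6, hdt]
  by_cases hr : PySem.Chars.rfind ((cs.drop i.toNat).take m.toNat) sub = -1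
  · simp [hr]
  · simp [hr, if_neg h6]

theorem pv_rfind_go_bound (s sub : List Char) (j : Nat) :
    PySem.Chars.rfind.go s sub j = -1 ∨
      (0 ≤ PySem.Chars.rfind.go s sub j ∧ PySem.Chars.rfind.go s sub j ≤ (j : Int) ∧
        sub <+: s.drop (PySem.Chars.rfind.go s sub j).toNat) := by
  induction j with
  | zero =>
    by_cases h : sub.isPrefixOf s
    · right; simp [PySem.Chars.rfind.go, h, List.isPrefixOf_iff_prefix.mp h]
    · left; simp [PySem.Chars.rfind.go, h]
  | succ j ih =>
    by_cases h : sub.isPrefixOf (s.drop (j+1))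
    · right
      simp only [PySem.Chars.rfind.go, h, if_true]
      refine ⟨by positivity, by omega, ?_⟩
      simpa using List.isPrefixOf_iff_prefix.mp h
    · have heq : PySem.Chars.rfind.go s sub (j+1) = PySem.Chars.rfind.go s sub j := by
        simp [PySem.Chars.rfind.go, h]
      rw [heq]
      rcases ih with h1 | ⟨a, b, c⟩
      · left; exact h1
      · right; exact ⟨a, by omega, c⟩

theorem pv_rfind_bound (s sub : List Char) (hsub : sub ≠ [])
    (h : PySem.Chars.rfind s sub ≠ -1) :
    0 ≤ PySem.Chars.rfind s sub ∧ PySem.Chars.rfind s sub < (s.length : Int) := by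
  rcases pv_rfind_go_bound s sub s.length with h1 | ⟨a, b, c⟩
  · exact absurd h1 h
  · unfold PySem.Chars.rfind at *
    refine ⟨a, ?_⟩
    by_contra hlt
    push Not at hlt
    have hnil : s.drop (PySem.Chars.rfind.go s sub s.length).toNat = [] := by
      apply List.drop_eq_nil_of_le; omega
    rw [hnil] at c
    exact hsub (List.prefix_nil.mp c)

theorem pv_rfindFrom_zero (s sub : List Char) (m : Int) (hm : 0 ≤ m)
    (hlen : m ≤ (s.length : Int)) :
    PySem.Chars.rfindFrom s sub 0 (some m) = PySem.Chars.rfind (s.take m.toNat) sub := by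
  unfold PySem.Chars.rfindFrom
  simp only [if_neg (by omega : ¬ ((s.length : Int) < m)), if_neg (by omega : ¬ (m < (0:Int)))]
  simp only [if_neg (by omega : ¬ ((0:Int) < 0)), List.drop_zero, Int.toNat_zero]
  rw [if_neg (by omega : ¬ (m < (0:Int)))]
  by_cases h : PySem.Chars.rfind (s.take m.toNat) sub = -1
  · simp [h]
  · simp [h]

theorem pv_loop_eq (cs : List Char) (maxLen : Int) (hm : 1 ≤ maxLen) :
    ∀ (fuel : Nat) (i : Int) (parts : List (List Char)), 0 ≤ i → i < (cs.length : Int) →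
      pvALoop maxLen fuel (cs.drop i.toNat) parts =
        pvBLoop cs maxLen (PySem.Int.floordiv maxLen 2) fuel i parts := by
  have hhalf : 0 ≤ PySem.Int.floordiv maxLen 2 := by
    simp [PySem.Int.floordiv]
    exact Int.fdiv_nonneg (by omega) (by omega)
  intro fuel
  induction fuel with
  | zero => intro i parts h0 hi; simp [pvALoop, pvBLoop]
  | succ fuel ih =>
    intro i parts h0 hi
    have hdl : ((cs.drop i.toNat).length : Int) = (cs.length : Int) - i := by
      simp [List.length_drop]; omega
    have hne : ¬ (cs.drop i.toNat).isEmpty := by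
      simp [List.isEmpty_iff]
      omega
    simp only [pvALoop, pvBLoop]
    rw [if_neg hne]
    by_cases hstop : (cs.length : Int) - i ≤ maxLen
    · rw [if_pos (by omega : ((cs.drop i.toNat).length : Int) ≤ maxLen), if_pos hstop,
        PySem.List.slice_from _ h0]
    · rw [if_neg (by omega : ¬ ((cs.drop i.toNat).length : Int) ≤ maxLen), if_neg hstop]
      have hwin : maxLen ≤ ((cs.drop i.toNat).length : Int) := by omega
      have hseg : (((cs.drop i.toNat).take maxLen.toNat).length : Int) = maxLen := by
        simp [List.length_take]; omega
      set seg := (cs.drop i.toNat).take maxLen.toNat with hsegdef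
      have hzn : PySem.Chars.rfindFrom (cs.drop i.toNat) ['\n'] 0 (some maxLen)
          = PySem.Chars.rfind seg ['\n'] := pv_rfindFrom_zero _ _ _ (by omega) hwin
      have hzs : PySem.Chars.rfindFrom (cs.drop i.toNat) [' '] 0 (some maxLen)
          = PySem.Chars.rfind seg [' '] := pv_rfindFrom_zero _ _ _ (by omega) hwin
      have hshn := pv_rfindFrom_shift cs ['\n'] i maxLen h0 (by omega) (by omega)
      have hshs := pv_rfindFrom_shift cs [' '] i maxLen h0 (by omega) (by omega)
      rw [hzn] at hshn
      rw [hzs] at hshs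
      set nlA := PySem.Chars.rfind seg ['\n'] with hnlA
      set spA := PySem.Chars.rfind seg [' '] with hspA
      set half := PySem.Int.floordiv maxLen 2 with hhalfdef
      have hnlb : nlA = -1 ∨ (0 ≤ nlA ∧ nlA < maxLen) := by
        by_cases h : nlA = -1
        · left; exact h
        · right
          have := pv_rfind_bound seg ['\n'] (by simp) h
          omega
      have hspb : spA = -1 ∨ (0 ≤ spA ∧ spA < maxLen) := by
        by_cases h : spA = -1
        · left; exact h
        · right
          have := pv_rfind_bound seg [' '] (by simp) h
          omega
      have hcN : (half < (if nlA = -1 then -1 else i + nlA) - i) = (half < nlA) := by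
        rcases hnlb with h | ⟨a, b⟩
        · simp only [h]; apply propext; constructor <;> intro <;> omega
        · rw [if_neg (by omega)]; apply propext; constructor <;> intro <;> omega
      have hcS : (half < (if spA = -1 then -1 else i + spA) - i) = (half < spA) := by
        rcases hspb with h | ⟨a, b⟩
        · simp only [h]; apply propext; constructor <;> intro <;> omega
        · rw [if_neg (by omega)]; apply propext; constructor <;> intro <;> omega
      have hstep : ∀ cut : Int, 1 ≤ cut → cut ≤ maxLen →
          pvALoop maxLen fuel (PySem.List.slice (cs.drop i.toNat) (some cut) none)
            (PySem.List.slice (cs.drop i.toNat) none (some cut) :: parts) =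
          pvBLoop cs maxLen half fuel (i + cut)
            (PySem.List.slice cs (some i) (some (i + cut)) :: parts) := by
        intro cut hc1 hc2
        rw [PySem.List.slice_from _ (by omega), PySem.List.slice_to _ (by omega),
            PySem.List.slice_toNat _ (by omega) (by omega)]
        have e1 : (i + cut).toNat - i.toNat = cut.toNat := by omega
        have e2 : (cs.drop i.toNat).drop cut.toNat = cs.drop (i + cut).toNat := by
          rw [List.drop_drop]; congr 1; omega
        rw [e1, e2]
        exact ih (i + cut) _ (by omega) (by omega)
      simp only [hzn, hzs, hshn, hshs, hcN, hcS]
      by_cases c1 : half < nlA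
      · have hnl : 0 ≤ nlA ∧ nlA < maxLen := by
          rcases hnlb with h | h
          · omega
          · exact h
        rw [if_pos c1, if_pos c1, if_neg (show ¬ nlA = -1 by omega)]
        have harg : i + nlA + 1 = i + (nlA + 1) := by ring
        rw [harg]
        exact hstep (nlA + 1) (by omega) (by omega)
      · rw [if_neg c1, if_neg c1]
        by_cases c2 : half < spA
        · have hsp : 0 ≤ spA ∧ spA < maxLen := by
            rcases hspb with h | h
            · omega
            · exact h
          rw [if_pos c2, if_pos c2, if_neg (show ¬ spA = -1 by omega)]
          have harg : i + spA + 1 = i + (spA + 1) := by ring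
          rw [harg]
          exact hstep (spA + 1) (by omega) (by omega)
        · rw [if_neg c2, if_neg c2]
          exact hstep maxLen (by omega) le_rfl

-- ===== VERDICT (by name: the statement is the Claim_ definition above) =====
theorem split_long_block_py_spec : Claim_equal_split_long_block_py := by
  intro block max_len _hdom hpre
  unfold Spec_split_long_block_py split_long_block_py split_long_block_py_alt
  by_cases hle : (block.toList.length : Int) ≤ max_len
  · rw [if_pos hle]
    simp only [pvBLoop]
    rw [if_pos (by omega)]
    simp [PySem.List.slice_from _ (le_refl (0:Int))]
  · rw [if_neg hle]
    have hm : 1 ≤ max_len := by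
      rcases hpre with h | h
      · exact h
      · rw [← String.length_toList] at h; omega
    have h := pv_loop_eq block.toList max_len hm (block.toList.length + 1) 0 [] le_rfl (by omega)
    simp only [Int.toNat_zero, List.drop_zero] at h
    rw [h]
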